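-- pv_equiv track=rewrite | github.com/scribe-org/Scribe-Data | src/scribe_data/translation/translation_utils.py | remove_articles_from_words
-- ===== SOURCE A (Python) =====
-- def remove_articles_from_words(
--     batch_words: list[str], articles: list[str]
-- ) -> list[str]:
--     """
--     Remove articles from a given list of words.
--
--     Parameters
--     ----------
--         batch_words : List[str]
--             The words derived as translations.
--
--         articles : List[str]
--             The articles to remove from translations.
--
--     Returns
--     -------
--         List[str]
--             Translated words without the articles for the language in question.
--     """
--
--     def remove_article(word: str) -> str:
--         for article in articles:
--             if word.lower().startswith(f"{article.lower()} "):
--                 return word[len(article) :].strip()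
--
--         return word
--
--     return [remove_article(word) for word in batch_words]
-- ===== SOURCE B (Python) =====
-- def remove_articles_from_words(
--     batch_words: list[str], articles: list[str]
-- ) -> list[str]:
--     # Transposed traversal: iterate articles in the outer loop over an
--     # Optional-result mask; first article (in list order) to match a word wins.
--     lowered = [w.lower() for w in batch_words]
--     results = [None] * len(batch_words)
--     for article in articles:
--         pref = article.lower() + " "
--         results = [
--             r if r is not None
--             else (w[len(article):].strip() if lw.startswith(pref) else None)
--             for r, w, lw in zip(results, batch_words, lowered)
--         ]
--     return [r if r is not None else w for r, w in zip(results, batch_words)]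
-- ===== Notes on version B (the rewrite author's own statement) =====
-- stated objective: alternative
-- what changed: Loop interchange: instead of scanning the articles list inside a per-word helper with an early return, B iterates articles in the outer loop over an Optional-result mask (words lower-cased once up front), filling each word's slot at its first matching article and defaulting untouched slots to the original word.
import Mathlib
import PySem

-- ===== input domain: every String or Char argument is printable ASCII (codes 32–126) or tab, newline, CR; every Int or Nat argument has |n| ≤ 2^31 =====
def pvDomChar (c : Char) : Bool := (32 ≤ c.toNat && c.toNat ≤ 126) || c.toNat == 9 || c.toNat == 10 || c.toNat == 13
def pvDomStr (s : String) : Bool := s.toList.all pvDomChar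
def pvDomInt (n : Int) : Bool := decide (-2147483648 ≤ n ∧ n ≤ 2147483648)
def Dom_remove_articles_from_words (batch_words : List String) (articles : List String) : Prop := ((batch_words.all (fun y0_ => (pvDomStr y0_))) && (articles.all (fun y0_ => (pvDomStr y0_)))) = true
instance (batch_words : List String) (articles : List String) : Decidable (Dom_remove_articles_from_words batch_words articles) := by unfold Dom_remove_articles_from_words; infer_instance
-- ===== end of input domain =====

-- B replaces A's per-word early-return scan over the articles with a transposed
-- (articles-outer) loop over an Option-result mask; alternative structure, same cost.

-- ===== PORT A =====
-- inner helper `remove_article`: for-loop over articles with early return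
def pvRemoveArticle (articles : List String) (word : String) : String :=
  match articles with
  | [] => word
  | article :: rest =>
      if PySem.Str.startswith (PySem.Str.lower word) (PySem.Str.lower article ++ " ") then
        PySem.Str.strip (PySem.Str.slice word (some (PySem.Str.len article : Int)) none)
      else
        pvRemoveArticle rest word

def remove_articles_from_words (batch_words : List String) (articles : List String) : List String :=
  batch_words.map (fun word => pvRemoveArticle articles word)

-- ===== PORT B =====
-- one step of B's inner comprehension, on one (result, word, lowered-word) triple
def pvStepB (article : String) (p : Option String × String × String) : Option String :=
  match p with
  | (some r, _, _) => some r
  | (none, w, lw) =>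
      if PySem.Str.startswith lw (PySem.Str.lower article ++ " ") then
        some (PySem.Str.strip (PySem.Str.slice w (some (PySem.Str.len article : Int)) none))
      else
        none

def remove_articles_from_words_alt (batch_words : List String) (articles : List String) : List String :=
  let lowered := batch_words.map PySem.Str.lower
  let init : List (Option String) := batch_words.map (fun _ => none)
  let results := articles.foldl
    (fun res article => (res.zip (batch_words.zip lowered)).map (pvStepB article)) init
  (results.zip batch_words).map (fun p => p.1.getD p.2)

-- ===== PRECONDITION & SPEC =====
def Spec_remove_articles_from_words (batch_words : List String) (articles : List String) (out : List String) : Prop := out = remove_articles_from_words_alt batch_words articles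
instance (batch_words : List String) (articles : List String) (out : List String) : Decidable (Spec_remove_articles_from_words batch_words articles out) := by unfold Spec_remove_articles_from_words; infer_instance

-- ===== CLAIM (what is proved, stated in full; the proofs are below) =====
def Claim_equal_remove_articles_from_words : Prop := ∀ (batch_words : List String) (articles : List String), Dom_remove_articles_from_words batch_words articles → Spec_remove_articles_from_words batch_words articles (remove_articles_from_words batch_words articles)

-- ===== LEMMAS AND PROOFS =====

-- a filled slot is never overwritten
theorem pvFoldB_some (articles : List String) (w lw : String) (r : String) :
    articles.foldl (fun s a => pvStepB a (s, w, lw)) (some r) = some r := by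
  induction articles with
  | nil => rfl
  | cons a rest ih => simpa [pvStepB] using ih

-- B's per-word fold, defaulted to the word, is A's per-word scan
theorem pvFoldB_eq_removeArticle (articles : List String) (w : String) :
    (articles.foldl (fun s a => pvStepB a (s, w, PySem.Str.lower w)) none).getD w
      = pvRemoveArticle articles w := by
  induction articles with
  | nil => rfl
  | cons a rest ih =>
      have hstep : pvStepB a (none, w, PySem.Str.lower w)
          = if PySem.Str.startswith (PySem.Str.lower w) (PySem.Str.lower a ++ " ") then
              some (PySem.Str.strip (PySem.Str.slice w (some (PySem.Str.len a : Int)) none))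
            else none := rfl
      simp only [List.foldl_cons, pvRemoveArticle, hstep]
      by_cases h : PySem.Str.startswith (PySem.Str.lower w) (PySem.Str.lower a ++ " ") = true
      · rw [if_pos h, if_pos h, pvFoldB_some]; rfl
      · rw [if_neg h, if_neg h, ih]

-- one inner pass: mapping the step over the zipped mask acts per word
theorem pvZipMap (a : String) (bw : List String) (g : String → Option String) :
    ((bw.map g).zip (bw.zip (bw.map PySem.Str.lower))).map (pvStepB a)
      = bw.map (fun w => pvStepB a (g w, w, PySem.Str.lower w)) := by
  induction bw with
  | nil => rfl
  | cons x xs ihx => simp [ihx]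

-- loop interchange: B's articles-outer fold over the mask is the map of per-word folds
theorem pvFoldB_pointwise (articles : List String) (bw : List String)
    (g : String → Option String) :
    articles.foldl
        (fun res article => (res.zip (bw.zip (bw.map PySem.Str.lower))).map (pvStepB article))
        (bw.map g)
      = bw.map (fun w => articles.foldl (fun s a => pvStepB a (s, w, PySem.Str.lower w)) (g w)) := by
  induction articles generalizing g with
  | nil => rfl
  | cons a rest ih =>
      simp only [List.foldl_cons]
      rw [pvZipMap, ih (fun w => pvStepB a (g w, w, PySem.Str.lower w))]

-- defaulting the mask against the original words, pointwise
theorem pvZipGetD (xs : List String) (f : String → Option String) :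
    ((xs.map f).zip xs).map (fun p => p.1.getD p.2) = xs.map (fun w => (f w).getD w) := by
  induction xs with
  | nil => rfl
  | cons x l ih => simp [ih]

-- ===== VERDICT (by name: the statement is the Claim_ definition above) =====
theorem remove_articles_from_words_spec : Claim_equal_remove_articles_from_words := by
  intro bw articles _
  unfold Spec_remove_articles_from_words remove_articles_from_words remove_articles_from_words_alt
  dsimp only
  rw [pvFoldB_pointwise articles bw (fun _ => none), pvZipGetD]
  simp [pvFoldB_eq_removeArticle]
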